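-- pv_equiv track=rewrite | github.com/M1ke6/Watermarking | Helper.py | fillBins
-- ===== SOURCE A (Python) =====
-- def fillBins(result_cs, d):     # Create a list and fill the coefficients into bins with size n*d*d, where n is any positive value
--                                 # This means we have d values per watermark bit and d watermark bits in the watermark
--     bins = [[[] for _ in range(d+1)] for _ in range(int(len(result_cs)/d/d)+1)]
--     e = 0
--     f = 0
--     g = 0
--     for index in range(0, len(result_cs)):
--         bins[g][f].append(result_cs[index])
--         if e < d - 1:
--             e += 1
--         else:
--             e = 0
--             if f < d - 1:
--                 f += 1
--             else:
--                 f = 0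
--                 g += 1
--     return bins
-- ===== SOURCE B (Python) =====
-- def fillBins(result_cs, d):
--     # Same bin layout as before; fill by slicing off one d-sized chunk at a time
--     # and assigning it to bins[k // d][k % d].
--     bins = [[[] for _ in range(d + 1)] for _ in range(len(result_cs) // (d * d) + 1)]
--     k = 0
--     while result_cs:
--         bins[k // d][k % d] = result_cs[:d]
--         result_cs = result_cs[d:]
--         k += 1
--     return bins
-- ===== Notes on version B (the rewrite author's own statement) =====
-- stated objective: simpler
-- what changed: Replaced A's per-element loop with the three-counter (e,f,g) state machine that appends one coefficient at a time by a chunk-slicing loop that cuts the list into d-sized slices and assigns the k-th slice directly to bins[k//d][k%d].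
import Mathlib
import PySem

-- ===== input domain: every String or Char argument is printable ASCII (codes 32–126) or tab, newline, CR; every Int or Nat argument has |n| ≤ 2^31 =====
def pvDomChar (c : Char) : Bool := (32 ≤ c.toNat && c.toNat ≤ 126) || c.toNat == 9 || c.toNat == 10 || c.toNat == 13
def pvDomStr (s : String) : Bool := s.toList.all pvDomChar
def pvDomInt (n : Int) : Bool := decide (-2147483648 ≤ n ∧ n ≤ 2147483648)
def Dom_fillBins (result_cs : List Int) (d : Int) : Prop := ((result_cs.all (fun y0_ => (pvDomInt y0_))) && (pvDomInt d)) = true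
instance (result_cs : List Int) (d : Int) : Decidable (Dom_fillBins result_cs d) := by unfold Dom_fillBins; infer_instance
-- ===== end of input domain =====

-- B replaces A's per-element (e,f,g) counter state machine by a chunk-slicing loop
-- that assigns each d-sized slice directly to bins[k//d][k%d] (objective: simpler).


-- ===== PORT A =====
-- One body of A's for-loop: append result_cs[index] to bins[g][f], then advance the
-- (e,f,g) counters.  e, f and g start at 0 and only ever grow or reset to 0, so they
-- are nonnegative throughout and indexing via .toNat is exact.
def fillBinsStep (d : Int) : (List (List (List Int)) × Int × Int × Int) → Int → (List (List (List Int)) × Int × Int × Int)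
  | (bins, e, f, g), x =>
    let bins' := bins.set g.toNat ((bins.getD g.toNat []).set f.toNat (((bins.getD g.toNat []).getD f.toNat []) ++ [x]))
    if e < d - 1 then (bins', e + 1, f, g)
    else if f < d - 1 then (bins', 0, f + 1, g)
    else (bins', 0, 0, g + 1)

-- 'int(len(result_cs)/d/d)' is ported as floor division by d*d: exact on Pre_
-- (d ≥ 1 with the float quotient a small nonnegative value, or the empty list).
def fillBins (result_cs : List Int) (d : Int) : List (List (List Int)) :=
  let bins := List.replicate (PySem.Int.floordiv (result_cs.length : Int) (d * d) + 1).toNat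
                (List.replicate (d + 1).toNat ([] : List Int))
  (result_cs.foldl (fillBinsStep d) (bins, 0, 0, 0)).1

-- ===== PORT B =====
-- B's 'while result_cs:' loop, one recursive call per d-sized chunk; the fuel
-- argument (initially len(result_cs)) only makes the recursion total: on Pre_
-- every step removes at least one element, so the fuel never runs out there.
def fillBinsGo (d : Int) : Nat → List Int → Int → List (List (List Int)) → List (List (List Int))
  | _, [], _, bins => bins
  | 0, _ :: _, _, bins => bins
  | fu + 1, x :: xs, k, bins =>
    let bins' := bins.set (PySem.Int.floordiv k d).toNat
      ((bins.getD (PySem.Int.floordiv k d).toNat []).set (PySem.Int.mod k d).toNat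
        (PySem.List.slice (x :: xs) none (some d)))
    fillBinsGo d fu (PySem.List.slice (x :: xs) (some d) none) (k + 1) bins'

def fillBins_alt (result_cs : List Int) (d : Int) : List (List (List Int)) :=
  let bins := List.replicate (PySem.Int.floordiv (result_cs.length : Int) (d * d) + 1).toNat
                (List.replicate (d + 1).toNat ([] : List Int))
  fillBinsGo d result_cs.length result_cs 0 bins

-- ===== PRECONDITION & SPEC =====
-- A raises on every excluded input: ZeroDivisionError for d = 0, and IndexError for
-- d < 0 with a nonempty list (the inner bins are then built empty).  For d < 0 and
-- the empty list A returns normally, so that case stays inside Pre_.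
def Pre_fillBins (result_cs : List Int) (d : Int) : Prop := 1 ≤ d ∨ (result_cs = [] ∧ d ≠ 0)
instance (result_cs : List Int) (d : Int) : Decidable (Pre_fillBins result_cs d) := by unfold Pre_fillBins; infer_instance

def pvWitness_fillBins : List Int × Int := ([1, 2, 3, 4, 5], 2)

def Spec_fillBins (result_cs : List Int) (d : Int) (out : List (List (List Int))) : Prop := out = fillBins_alt result_cs d
instance (result_cs : List Int) (d : Int) (out : List (List (List Int))) : Decidable (Spec_fillBins result_cs d out) := by unfold Spec_fillBins; infer_instance

-- ===== CLAIM (what is proved, stated in full; the proofs are below) =====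
def Claim_equal_fillBins : Prop := ∀ (result_cs : List Int) (d : Int), Dom_fillBins result_cs d → Pre_fillBins result_cs d → Spec_fillBins result_cs d (fillBins result_cs d)

-- ===== LEMMAS AND PROOFS =====

-- Updating / reading one cell of the nested bins structure.
def cellUpd (bins : List (List (List Int))) (G F : Nat) (h : List Int → List Int) : List (List (List Int)) :=
  bins.set G ((bins.getD G []).set F (h ((bins.getD G []).getD F [])))

def cellGet (bins : List (List (List Int))) (G F : Nat) : List Int :=
  (bins.getD G []).getD F []

theorem getD_set_self {α : Type} (l : List α) (n : Nat) (a d : α) (h : n < l.length) :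
    (l.set n a).getD n d = a := by
  simp [List.getD_eq_getElem?_getD, List.getElem?_set_self h]

theorem fillBinsStep_eq (d : Int) (bins : List (List (List Int))) (e f g x : Int) :
    fillBinsStep d (bins, e, f, g) x =
      if e < d - 1 then (cellUpd bins g.toNat f.toNat (· ++ [x]), e + 1, f, g)
      else if f < d - 1 then (cellUpd bins g.toNat f.toNat (· ++ [x]), 0, f + 1, g)
      else (cellUpd bins g.toNat f.toNat (· ++ [x]), 0, 0, g + 1) := rfl

theorem cellUpd_cellUpd (bins : List (List (List Int))) (G F : Nat)
    (h₁ h₂ : List Int → List Int) :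
    cellUpd (cellUpd bins G F h₁) G F h₂ = cellUpd bins G F (fun c => h₂ (h₁ c)) := by
  unfold cellUpd
  by_cases hG : G < bins.length
  · rw [getD_set_self _ _ _ _ hG]
    by_cases hF : F < (bins.getD G []).length
    · rw [getD_set_self _ _ _ _ hF, List.set_set, List.set_set]
    · rw [List.set_eq_of_length_le (le_of_not_gt hF), List.set_eq_of_length_le (le_of_not_gt hF),
        List.set_eq_of_length_le (le_of_not_gt hF), List.set_set]
  · rw [List.set_eq_of_length_le (le_of_not_gt hG), List.set_eq_of_length_le (le_of_not_gt hG),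
      List.set_eq_of_length_le (le_of_not_gt hG)]

theorem cellGet_cellUpd_ne (bins : List (List (List Int))) (G F G' F' : Nat)
    (h : List Int → List Int) (hne : (G, F) ≠ (G', F')) :
    cellGet (cellUpd bins G F h) G' F' = cellGet bins G' F' := by
  unfold cellGet cellUpd
  by_cases hGG : G = G'
  · subst hGG
    have hFF : F ≠ F' := by intro he; exact hne (by rw [he])
    by_cases hG : G < bins.length
    · rw [getD_set_self _ _ _ _ hG]
      simp [List.getD_eq_getElem?_getD, List.getElem?_set_ne hFF]
    · rw [List.set_eq_of_length_le (le_of_not_gt hG)]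
  · simp [List.getD_eq_getElem?_getD, List.getElem?_set_ne hGG]

-- Running A's loop over a list too short to fill the current bin: every element is
-- appended to cell (g,f) and e advances by the length.
theorem A_run (d : Int) (c : List Int) :
    ∀ (bins : List (List (List Int))) (e f g : Int), 0 ≤ e → e + c.length ≤ d - 1 → c ≠ [] →
    List.foldl (fillBinsStep d) (bins, e, f, g) c =
      (cellUpd bins g.toNat f.toNat (· ++ c), e + c.length, f, g) := by
  induction c using List.reverseRecOn with
  | nil => intro _ _ _ _ _ _ hne; exact absurd rfl hne
  | append_singleton c x ih =>
    intro bins e f g he hlen _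
    rw [List.foldl_append]
    by_cases hc : c = []
    · subst hc
      simp only [List.nil_append, List.foldl_cons, List.foldl_nil, fillBinsStep_eq]
      rw [if_pos (by simp at hlen ⊢; omega)]
      simp
    · rw [ih bins e f g he (by simp at hlen ⊢; omega) hc]
      simp only [List.foldl_cons, List.foldl_nil, fillBinsStep_eq]
      rw [if_pos (by simp at hlen ⊢; push_cast; omega)]
      rw [cellUpd_cellUpd]
      have harg : (fun cc => (cc ++ c) ++ [x]) = (· ++ (c ++ [x])) :=
        funext fun cc => List.append_assoc cc c [x]
      rw [harg]
      simp only [List.length_append, List.length_cons, List.length_nil, Prod.mk.injEq,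
        true_and, and_true]
      omega

-- Running A's loop over one full bin of exactly d elements: the bin is filled and
-- the (f,g) counters advance.
theorem A_chunk_full (d : Int) (hd : 1 ≤ d) (c : List Int) (hc : (c.length : Int) = d)
    (bins : List (List (List Int))) (f g : Int) :
    List.foldl (fillBinsStep d) (bins, 0, f, g) c =
      (cellUpd bins g.toNat f.toNat (· ++ c), 0,
        if f < d - 1 then f + 1 else 0, if f < d - 1 then g else g + 1) := by
  rcases c.eq_nil_or_concat with rfl | ⟨c', x, rfl⟩
  · simp at hc; omega
  · rw [List.concat_eq_append] at hc ⊢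
    rw [List.foldl_append]
    by_cases hc' : c' = []
    · subst hc'
      simp only [List.nil_append, List.foldl_cons, List.foldl_nil, fillBinsStep_eq]
      rw [if_neg (by simp at hc; omega)]
      split_ifs <;> simp
    · rw [A_run d c' bins 0 f g le_rfl (by simp at hc ⊢; omega) hc']
      simp only [List.foldl_cons, List.foldl_nil, fillBinsStep_eq]
      rw [if_neg (by simp at hc ⊢; omega)]
      rw [cellUpd_cellUpd]
      have harg : (fun cc => (cc ++ c') ++ [x]) = (· ++ (c' ++ [x])) :=
        funext fun cc => List.append_assoc cc c' [x]
      split_ifs <;> simp only [harg, Prod.mk.injEq, and_self]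

theorem cellGet_replicate (a b G F : Nat) :
    cellGet (List.replicate a (List.replicate b ([] : List Int))) G F = [] := by
  unfold cellGet
  simp only [List.getD_eq_getElem?_getD, List.getElem?_replicate]
  split_ifs <;> simp [List.getElem?_replicate] <;> split_ifs <;> simp

-- Main invariant lemma: as long as every bin from chunk index k onwards is still
-- empty, A's counter loop started at counters (0, k % d, k // d) computes the same
-- bins as B's chunk loop started at chunk index k.
theorem mainLoop (d : Int) (hd : 1 ≤ d) :
    ∀ (n : Nat) (xs : List Int), xs.length ≤ n → ∀ (fu : Nat), xs.length ≤ fu →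
    ∀ (bins : List (List (List Int))) (k : Int), 0 ≤ k →
    (∀ j : Int, k ≤ j →
      cellGet bins (PySem.Int.floordiv j d).toNat (PySem.Int.mod j d).toNat = []) →
    (List.foldl (fillBinsStep d) (bins, 0, PySem.Int.mod k d, PySem.Int.floordiv k d) xs).1
      = fillBinsGo d fu xs k bins := by
  intro n
  induction n with
  | zero =>
    intro xs hxs fu hfu bins k hk hinv
    cases xs with
    | nil => cases fu <;> rfl
    | cons x xs' => simp at hxs
  | succ n ih =>
    intro xs hxs fu hfu bins k hk hinv
    cases xs with
    | nil => cases fu <;> rfl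
    | cons x xs' =>
      cases fu with
      | zero => simp at hfu
      | succ fu' =>
        have hdpos : (0 : Int) < d := by omega
        have hdfd : PySem.Int.floordiv k d = k / d := PySem.Int.floordiv_eq_ediv_of_pos hdpos
        have hdmd : PySem.Int.mod k d = k % d := PySem.Int.mod_eq_emod_of_pos hdpos
        -- B's step, with the slices rewritten to take/drop
        have hgo : fillBinsGo d (fu' + 1) (x :: xs') k bins =
            fillBinsGo d fu' ((x :: xs').drop d.toNat) (k + 1)
              (bins.set (k / d).toNat
                ((bins.getD (k / d).toNat []).set (k % d).toNat ((x :: xs').take d.toNat))) := by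
          rw [show fillBinsGo d (fu' + 1) (x :: xs') k bins =
              fillBinsGo d fu' (PySem.List.slice (x :: xs') (some d) none) (k + 1)
                (bins.set (PySem.Int.floordiv k d).toNat
                  ((bins.getD (PySem.Int.floordiv k d).toNat []).set (PySem.Int.mod k d).toNat
                    (PySem.List.slice (x :: xs') none (some d)))) from rfl]
          rw [hdfd, hdmd, PySem.List.slice_to _ (by omega : (0:Int) ≤ d),
            PySem.List.slice_from _ (by omega : (0:Int) ≤ d)]
        have hcell : cellGet bins (k / d).toNat (k % d).toNat = [] := by
          have := hinv k le_rfl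
          rwa [hdfd, hdmd] at this
        have hbins' : bins.set (k / d).toNat
            ((bins.getD (k / d).toNat []).set (k % d).toNat ((x :: xs').take d.toNat)) =
            cellUpd bins (k / d).toNat (k % d).toNat (· ++ (x :: xs').take d.toNat) := by
          unfold cellUpd
          have h0 : (bins.getD (k / d).toNat []).getD (k % d).toNat [] = [] := hcell
          rw [h0]
          simp
        -- chunk-index arithmetic
        have hq : d * (k / d) + k % d = k := Int.mul_ediv_add_emod k d
        have hr0 : 0 ≤ k % d := Int.emod_nonneg k (by omega)
        have hrd : k % d < d := Int.emod_lt_of_pos k hdpos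
        have hmul : d * (k / d + 1) = d * (k / d) + d := by ring
        have hnext : (if k % d < d - 1 then k % d + 1 else 0) = (k + 1) % d ∧
            (if k % d < d - 1 then k / d else k / d + 1) = (k + 1) / d := by
          by_cases hcase : k % d < d - 1
          · have h := (Int.ediv_emod_unique (a := k + 1) (r := k % d + 1) (q := k / d) hdpos).mpr
              ⟨by omega, by omega, by omega⟩
            rw [if_pos hcase, if_pos hcase]
            exact ⟨h.2.symm, h.1.symm⟩
          · have h := (Int.ediv_emod_unique (a := k + 1) (r := 0) (q := k / d + 1) hdpos).mpr
              ⟨by omega, le_rfl, by omega⟩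
            rw [if_neg hcase, if_neg hcase]
            exact ⟨h.2.symm, h.1.symm⟩
        -- the invariant is preserved by filling the current bin
        have hinv' : ∀ j : Int, k + 1 ≤ j →
            cellGet (cellUpd bins (k / d).toNat (k % d).toNat (· ++ (x :: xs').take d.toNat))
              (PySem.Int.floordiv j d).toNat (PySem.Int.mod j d).toNat = [] := by
          intro j hj
          have hjd : PySem.Int.floordiv j d = j / d := PySem.Int.floordiv_eq_ediv_of_pos hdpos
          have hjm : PySem.Int.mod j d = j % d := PySem.Int.mod_eq_emod_of_pos hdpos
          have hne : ((k / d).toNat, (k % d).toNat)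
              ≠ ((PySem.Int.floordiv j d).toNat, (PySem.Int.mod j d).toNat) := by
            rw [hjd, hjm]
            intro heq
            have h1 : (k / d).toNat = (j / d).toNat := congrArg Prod.fst heq
            have h2 : (k % d).toNat = (j % d).toNat := congrArg Prod.snd heq
            have hq' : d * (j / d) + j % d = j := Int.mul_ediv_add_emod j d
            have hr0' : 0 ≤ j % d := Int.emod_nonneg j (by omega)
            have hrd' : j % d < d := Int.emod_lt_of_pos j hdpos
            have hq0 : 0 ≤ k / d := Int.ediv_nonneg hk (by omega)
            have hq0' : 0 ≤ j / d := Int.ediv_nonneg (by omega) (by omega)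
            have heqq : k / d = j / d := by omega
            have heqr : k % d = j % d := by omega
            have hdd : d * (k / d) = d * (j / d) := by rw [heqq]
            omega
          rw [cellGet_cellUpd_ne bins _ _ _ _ _ hne]
          exact hinv j (by omega)
        rw [hgo, hbins', hdmd, hdfd]
        by_cases hfull : d.toNat ≤ (x :: xs').length
        · -- a full chunk of exactly d elements
          have hclen : (((x :: xs').take d.toNat).length : Int) = d := by
            rw [List.length_take]
            omega
          conv_lhs => rw [show (x :: xs') = (x :: xs').take d.toNat ++ (x :: xs').drop d.toNat from
            (List.take_append_drop _ _).symm]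
          rw [List.foldl_append, A_chunk_full d hd _ hclen, hnext.1, hnext.2]
          have hmod : (k + 1) % d = PySem.Int.mod (k + 1) d :=
            (PySem.Int.mod_eq_emod_of_pos hdpos).symm
          have hdiv : (k + 1) / d = PySem.Int.floordiv (k + 1) d :=
            (PySem.Int.floordiv_eq_ediv_of_pos hdpos).symm
          rw [hmod, hdiv]
          apply ih
          · simp only [List.length_drop]
            simp at hxs ⊢
            omega
          · simp only [List.length_drop]
            simp at hfu ⊢
            omega
          · omega
          · exact hinv'
        · -- the partial final chunk: the whole rest of the list fills the current bin
          have htake : (x :: xs').take d.toNat = (x :: xs') := List.take_of_length_le (by omega)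
          have hdrop : (x :: xs').drop d.toNat = [] := List.drop_eq_nil_of_le (by omega)
          rw [A_run d (x :: xs') bins 0 (k % d) (k / d) le_rfl
            (by simp at hfull ⊢; omega) (by simp), hdrop, htake]
          cases fu' <;> rfl

-- ===== VERDICT (by name: the statement is the Claim_ definition above) =====
theorem fillBins_spec : Claim_equal_fillBins := by
  intro result_cs d _ hpre
  unfold Spec_fillBins
  rcases hpre with hd | ⟨rfl, hd0⟩
  · unfold fillBins fillBins_alt
    have hdpos : (0 : Int) < d := by omega
    have h0m : PySem.Int.mod 0 d = 0 := by
      rw [PySem.Int.mod_eq_emod_of_pos hdpos]; simp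
    have h0f : PySem.Int.floordiv 0 d = 0 := by
      rw [PySem.Int.floordiv_eq_ediv_of_pos hdpos]; simp
    rw [show ((0 : Int), (0 : Int), (0 : Int)) =
        ((0 : Int), PySem.Int.mod 0 d, PySem.Int.floordiv 0 d) by rw [h0m, h0f]]
    exact mainLoop d hd result_cs.length result_cs le_rfl result_cs.length le_rfl _ 0 le_rfl
      (fun j _ => cellGet_replicate _ _ _ _)
  · rfl
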